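-- pv_equiv track=rewrite | github.com/BlackKingWhitePawn/reidentification | src/data/utils.py | get_possible_tuples
-- ===== SOURCE A (Python) =====
-- def _get_possible_tuples(distance: int, segment: list[int]) -> list[tuple[int, int]]:
--     end = max(len(segment) - distance - 1, 0)
--     return [(i, i + distance + 1) for i in range(segment[0], segment[end])]
--
-- def get_possible_tuples(distance: int, segments: list[list[int]]) -> list[tuple[int, int]]:
--     """Возвращает список возможных пар чисел с заданным расстоянием для отрезка
--     ### Parameters:
--     - distance: int - расстояние между элементами
--     - segments: list[list[int]] - список непрерывных отрезков
--     """
--     res = []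
--     prev = None
--     for segment in segments:
--         tuples = _get_possible_tuples(distance, segment)
--         if (prev is not None and segment[0] - prev[-1] - 1 == distance):
--             res.append((prev[-1], segment[0]))
--
--         prev = segment
--         res += tuples
--
--     return res
-- ===== SOURCE B (Python) =====
-- def _get_possible_tuples(distance: int, segment: list[int]) -> list[tuple[int, int]]:
--     end = max(len(segment) - distance - 1, 0)
--     return [(i, i + distance + 1) for i in range(segment[0], segment[end])]
--
-- def _rest(distance, a, tail):
--     if not tail:
--         return []
--     b = tail[0]
--     bridge = [(a[-1], b[0])] if b[0] - a[-1] - 1 == distance else []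
--     return bridge + _get_possible_tuples(distance, b) + _rest(distance, b, tail[1:])
--
-- def get_possible_tuples(distance: int, segments: list[list[int]]) -> list[tuple[int, int]]:
--     if not segments:
--         return []
--     return _get_possible_tuples(distance, segments[0]) + _rest(distance, segments[0], segments[1:])
-- ===== Notes on version B (the rewrite author's own statement) =====
-- stated objective: alternative
-- what changed: Replaces the single loop threading a prev/result accumulator with a recursive pairwise decomposition: emit the first segment's tuples, then recurse over consecutive segment pairs building bridge + tuples + rest by concatenation.
import Mathlib
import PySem

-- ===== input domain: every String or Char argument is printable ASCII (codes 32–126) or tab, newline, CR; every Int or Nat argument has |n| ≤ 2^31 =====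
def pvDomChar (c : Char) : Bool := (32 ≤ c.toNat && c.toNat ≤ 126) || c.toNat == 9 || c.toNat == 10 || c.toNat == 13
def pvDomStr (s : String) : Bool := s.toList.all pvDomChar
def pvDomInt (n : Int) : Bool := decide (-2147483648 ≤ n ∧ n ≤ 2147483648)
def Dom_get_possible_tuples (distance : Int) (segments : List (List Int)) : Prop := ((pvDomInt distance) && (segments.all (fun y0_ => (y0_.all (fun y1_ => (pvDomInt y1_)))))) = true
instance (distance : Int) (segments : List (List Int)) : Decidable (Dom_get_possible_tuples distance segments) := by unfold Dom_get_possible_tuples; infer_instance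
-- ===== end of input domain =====

-- B replaces A's loop with a prev/result accumulator by a recursive pairwise decomposition
-- (first segment's tuples, then bridge + tuples + rest over consecutive pairs); same cost.

-- ===== PORT A =====
-- helper _get_possible_tuples (shared verbatim by both Pythons)
def pvSegTuples (distance : Int) (segment : List Int) : List (Int × Int) :=
  let e := max ((segment.length : Int) - distance - 1) 0
  match PySem.List.pyGet? segment 0, PySem.List.pyGet? segment e with
  | some a, some b => (PySem.List.pyRange a b 1).map (fun i => (i, i + distance + 1))
  | _, _ => []  -- Python raises IndexError here; excluded by Pre_

def get_possible_tuples (distance : Int) (segments : List (List Int)) : List (Int × Int) :=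
  (segments.foldl
    (fun (st : List (Int × Int) × Option (List Int)) segment =>
      let tuples := pvSegTuples distance segment
      let res :=
        match st.2 with
        | some prev =>
          if (PySem.List.pyGet? segment 0).getD 0 - (PySem.List.pyGet? prev (-1)).getD 0 - 1 = distance then
            st.1 ++ [((PySem.List.pyGet? prev (-1)).getD 0, (PySem.List.pyGet? segment 0).getD 0)]
          else st.1
        | none => st.1
      (res ++ tuples, some segment))
    ([], none)).1

-- ===== PORT B =====
def pvRestB (distance : Int) (a : List Int) (tail : List (List Int)) : List (Int × Int) :=
  match tail with
  | [] => []
  | b :: rest =>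
    (if (PySem.List.pyGet? b 0).getD 0 - (PySem.List.pyGet? a (-1)).getD 0 - 1 = distance then
       [((PySem.List.pyGet? a (-1)).getD 0, (PySem.List.pyGet? b 0).getD 0)]
     else [])
    ++ pvSegTuples distance b ++ pvRestB distance b rest

def get_possible_tuples_alt (distance : Int) (segments : List (List Int)) : List (Int × Int) :=
  match segments with
  | [] => []
  | s :: rest => pvSegTuples distance s ++ pvRestB distance s rest

-- ===== PRECONDITION & SPEC =====
-- Pre_ excludes exactly the inputs where A raises IndexError: an empty segment (segment[0]),
-- or a negative distance with a nonempty segment list (then segment[end] with end = len(segment)+|distance|-1 is out of range).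
def Pre_get_possible_tuples (distance : Int) (segments : List (List Int)) : Prop :=
  (∀ s ∈ segments, s ≠ []) ∧ (segments ≠ [] → 0 ≤ distance)
instance (distance : Int) (segments : List (List Int)) : Decidable (Pre_get_possible_tuples distance segments) := by unfold Pre_get_possible_tuples; infer_instance
def pvWitness_get_possible_tuples : Int × List (List Int) := (1, [[0, 1, 2, 3], [6, 7, 8]])
def Spec_get_possible_tuples (distance : Int) (segments : List (List Int)) (out : List (Int × Int)) : Prop := out = get_possible_tuples_alt distance segments
instance (distance : Int) (segments : List (List Int)) (out : List (Int × Int)) : Decidable (Spec_get_possible_tuples distance segments out) := by unfold Spec_get_possible_tuples; infer_instance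

-- ===== CLAIM (what is proved, stated in full; the proofs are below) =====
def Claim_equal_get_possible_tuples : Prop := ∀ (distance : Int) (segments : List (List Int)), Dom_get_possible_tuples distance segments → Pre_get_possible_tuples distance segments → Spec_get_possible_tuples distance segments (get_possible_tuples distance segments)

-- ===== LEMMAS AND PROOFS =====
-- A's fold, once a previous segment exists, accumulates exactly B's pairwise recursion.
theorem pv_fold_eq_rest (distance : Int) (segments : List (List Int)) :
    ∀ (res : List (Int × Int)) (prev : List Int),
    (segments.foldl
      (fun (st : List (Int × Int) × Option (List Int)) segment =>
        let tuples := pvSegTuples distance segment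
        let res :=
          match st.2 with
          | some prev =>
            if (PySem.List.pyGet? segment 0).getD 0 - (PySem.List.pyGet? prev (-1)).getD 0 - 1 = distance then
              st.1 ++ [((PySem.List.pyGet? prev (-1)).getD 0, (PySem.List.pyGet? segment 0).getD 0)]
            else st.1
          | none => st.1
        (res ++ tuples, some segment))
      (res, some prev)).1 = res ++ pvRestB distance prev segments := by
  induction segments with
  | nil => intro res prev; simp [pvRestB]
  | cons b rest ih =>
    intro res prev
    simp only [List.foldl_cons]
    rw [ih]
    simp only [pvRestB]
    split_ifs <;> simp

-- ===== VERDICT (by name: the statement is the Claim_ definition above) =====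
theorem get_possible_tuples_spec : Claim_equal_get_possible_tuples := by
  intro distance segments _ _
  unfold Spec_get_possible_tuples get_possible_tuples get_possible_tuples_alt
  cases segments with
  | nil => rfl
  | cons s rest =>
    simp only [List.foldl_cons]
    rw [pv_fold_eq_rest]
    simp
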